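-- pv_equiv track=rewrite | github.com/hat/leetcode | april2020_challenge/backspaceStringCompare.py | _helper
-- ===== SOURCE A (Python) =====
-- def _helper(S):
--     S = list(S)
--     ind = 0
--     while ind < len(S):
--         if S[ind] == '#':
--             S.pop(ind)
--             if ind > 0:
--                 S.pop(ind - 1)
--             ind = -1
--         ind += 1
--     return ''.join(S)
-- ===== SOURCE B (Python) =====
-- def _helper(S):
--     st = []
--     for c in S:
--         if c == '#':
--             if st:
--                 st.pop()
--         else:
--             st.append(c)
--     return ''.join(st)
-- ===== Notes on version B (the rewrite author's own statement) =====
-- stated objective: faster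
-- what changed: Replaced A's restart-from-the-beginning scan with repeated list.pop (quadratic) by a single left-to-right pass over the string maintaining a stack: push each character, pop on '#'.
import Mathlib
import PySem

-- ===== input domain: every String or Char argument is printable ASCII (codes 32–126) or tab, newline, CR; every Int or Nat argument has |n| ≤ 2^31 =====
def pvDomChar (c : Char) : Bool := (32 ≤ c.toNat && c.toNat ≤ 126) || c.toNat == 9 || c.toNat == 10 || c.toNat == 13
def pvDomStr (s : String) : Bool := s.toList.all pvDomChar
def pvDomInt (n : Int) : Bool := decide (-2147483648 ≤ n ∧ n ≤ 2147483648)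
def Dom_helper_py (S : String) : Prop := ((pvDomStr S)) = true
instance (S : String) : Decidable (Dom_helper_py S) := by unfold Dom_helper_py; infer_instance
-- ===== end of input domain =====

-- B replaces A's restart-from-scratch scan with repeated pops (quadratic) by one
-- left-to-right pass over the string maintaining a stack (objective: faster).

-- ===== PORT A =====
-- A's while loop: `ind` is 0 at entry and is reset to -1 then immediately
-- incremented to 0 after each deletion, so at every loop head ind ≥ 0 (a Nat).
-- `S.pop(i)` at a valid index 0 ≤ i < len(S) removes exactly element i, which is
-- List.eraseIdx i (exact here: both pops happen only at in-range indices).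
def helperLoopA (S : List Char) (ind : Nat) : List Char :=
  if h : ind < S.length then
    if S[ind] = '#' then
      helperLoopA
        (if ind > 0 then (S.eraseIdx ind).eraseIdx (ind - 1) else S.eraseIdx ind) 0
    else
      helperLoopA S (ind + 1)
  else S
termination_by (S.length, S.length - ind)
decreasing_by
  · left
    have h1 : (S.eraseIdx ind).length < S.length := by
      rw [List.length_eraseIdx_of_lt h]; omega
    split_ifs
    · exact lt_of_le_of_lt (List.length_eraseIdx_le _ _) h1
    · exact h1
  · right; omega

def helper_py (S : String) : String := String.ofList (helperLoopA S.toList 0)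

-- ===== PORT B =====
def helperStepB (st : List Char) (c : Char) : List Char :=
  if c = '#' then (if st = [] then st else st.dropLast) else st ++ [c]

def helper_py_alt (S : String) : String := String.ofList (S.toList.foldl helperStepB [])

-- ===== PRECONDITION & SPEC =====
def Spec_helper_py (S : String) (out : String) : Prop := out = helper_py_alt S
instance (S : String) (out : String) : Decidable (Spec_helper_py S out) := by unfold Spec_helper_py; infer_instance

-- ===== CLAIM (what is proved, stated in full; the proofs are below) =====
def Claim_equal_helper_py : Prop := ∀ (S : String), Dom_helper_py S → Spec_helper_py S (helper_py S)

-- ===== LEMMAS AND PROOFS =====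

-- a '#'-free prefix passes through the stack unchanged
theorem foldl_step_no_hash (p : List Char) (st : List Char)
    (hp : ∀ c ∈ p, c ≠ '#') : p.foldl helperStepB st = st ++ p := by
  induction p generalizing st with
  | nil => simp
  | cons a t ih =>
      have ha : a ≠ '#' := hp a (by simp)
      simp only [List.foldl_cons, helperStepB, if_neg ha]
      rw [ih _ (fun c hc => hp c (by simp [hc]))]
      simp

-- invariant: if the first `ind` characters are '#'-free, A's loop from (S, ind)
-- returns exactly B's stack result on S (outer induction: a bound on the list
-- length, which drops at every deletion; inner induction: the remaining indices)
theorem helperLoopA_eq_foldl (n : Nat) : ∀ (S : List Char) (ind : Nat), S.length ≤ n →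
    (∀ j, (h : j < S.length) → j < ind → S[j] ≠ '#') →
    helperLoopA S ind = S.foldl helperStepB [] := by
  induction n with
  | zero =>
      intro S ind hlen _
      have hS : S = [] := List.eq_nil_of_length_eq_zero (by omega)
      subst hS
      rw [helperLoopA]
      simp
  | succ n ihn =>
      intro S
      have inner : ∀ (k ind : Nat), S.length - ind ≤ k → S.length ≤ n + 1 →
          (∀ j, (h : j < S.length) → j < ind → S[j] ≠ '#') →
          helperLoopA S ind = S.foldl helperStepB [] := by
        intro k
        induction k with
        | zero =>
            intro ind hk hlen hinv
            have hge : ¬ ind < S.length := by omega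
            rw [helperLoopA, dif_neg hge]
            have hno : ∀ c ∈ S, c ≠ '#' := by
              intro c hc
              obtain ⟨j, hj, rfl⟩ := List.mem_iff_getElem.mp hc
              exact hinv j hj (by omega)
            rw [foldl_step_no_hash _ _ hno, List.nil_append]
        | succ k ihk =>
            intro ind hk hlen hinv
            by_cases h : ind < S.length
            · rw [helperLoopA, dif_pos h]
              by_cases hhash : S[ind] = '#'
              · rw [if_pos hhash]
                -- the deletion branch: list shrinks, use the outer IH
                set S' := (if ind > 0 then (S.eraseIdx ind).eraseIdx (ind - 1) else S.eraseIdx ind) with hS'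
                have hlen' : S'.length ≤ n := by
                  have h1 : (S.eraseIdx ind).length < S.length := by
                    rw [List.length_eraseIdx_of_lt h]; omega
                  rw [hS']
                  split_ifs
                  · have := List.length_eraseIdx_le (S.eraseIdx ind) (ind - 1)
                    omega
                  · omega
                rw [ihn S' 0 hlen' (fun j hj hj0 => absurd hj0 (by omega))]
                -- now show the fold is unchanged by the deletion
                by_cases hind : ind > 0
                · rw [hS', if_pos hind]
                  have hS : S = S.take ind ++ S[ind] :: S.drop (ind + 1) := by
                    rw [List.getElem_cons_drop]; exact (List.take_append_drop ind S).symm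
                  have hp : ∀ c ∈ S.take ind, c ≠ '#' := by
                    intro c hc
                    obtain ⟨j, hj, rfl⟩ := List.mem_take_iff_getElem.mp hc
                    exact hinv j (by omega) (by omega)
                  have htl : (S.take ind).length = ind := by rw [List.length_take]; omega
                  have hdl : (S.take ind).dropLast = S.take (ind - 1) := by
                    rw [List.dropLast_eq_take, htl, List.take_take]
                    congr 1
                    omega
                  have herase : (S.eraseIdx ind).eraseIdx (ind - 1)
                      = (S.take ind).dropLast ++ S.drop (ind + 1) := by
                    rw [List.eraseIdx_eq_take_drop_succ S ind,
                        List.eraseIdx_append_of_lt_length (by rw [htl]; omega)]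
                    congr 1
                    exact (List.dropLast_eq_eraseIdx (by rw [htl]; omega)).symm
                  rw [herase]
                  have hpd : ∀ c ∈ (S.take ind).dropLast, c ≠ '#' := fun c hc =>
                    hp c (List.dropLast_subset _ hc)
                  conv_rhs => rw [hS, hhash]
                  rw [List.foldl_append, List.foldl_append,
                      foldl_step_no_hash _ _ hp, foldl_step_no_hash _ _ hpd]
                  have hne : S.take ind ≠ [] := by
                    intro habs
                    rw [habs] at htl
                    simp at htl
                    omega
                  have hstep : helperStepB (List.nil ++ S.take ind) '#' = (S.take ind).dropLast := by
                    simp [helperStepB, hne]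
                  simp only [List.foldl_cons, hstep]
                  simp
                · -- ind = 0: only the '#' itself is popped
                  have hind0 : ind = 0 := by omega
                  subst hind0
                  rw [hS']
                  simp only [gt_iff_lt, lt_irrefl, if_false]
                  obtain ⟨a, t, rfl⟩ : ∃ a t, S = a :: t := by
                    cases S with
                    | nil => simp at h
                    | cons a t => exact ⟨a, t, rfl⟩
                  simp only [List.getElem_cons_zero] at hhash
                  subst hhash
                  simp [helperStepB]
              · rw [if_neg hhash]
                exact ihk (ind + 1) (by omega) hlen (fun j hj hj' => by
                  rcases Nat.lt_or_ge j ind with hlt | hge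
                  · exact hinv j hj hlt
                  · have : j = ind := by omega
                    subst this; exact hhash)
            · rw [helperLoopA, dif_neg h]
              have hno : ∀ c ∈ S, c ≠ '#' := by
                intro c hc
                obtain ⟨j, hj, rfl⟩ := List.mem_iff_getElem.mp hc
                exact hinv j hj (by omega)
              rw [foldl_step_no_hash _ _ hno, List.nil_append]
      intro ind hlen hinv
      exact inner (S.length - ind) ind le_rfl hlen hinv

-- ===== VERDICT (by name: the statement is the Claim_ definition above) =====
theorem helper_py_spec : Claim_equal_helper_py := by
  intro S _
  unfold Spec_helper_py helper_py helper_py_alt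
  rw [helperLoopA_eq_foldl S.toList.length S.toList 0 le_rfl
    (fun j hj hj0 => absurd hj0 (by omega))]
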